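-- pv_equiv track=rewrite | github.com/lugia574/algorism | venv/BeakJoon/BeakJoon_9020_Goldbach's conjecture.py | Goldbach2
-- ===== SOURCE A (Python) =====
-- import math
--
-- def Goldbach2(num):
--     Gold_nums = []
--     Prime_number_list = [True] *(num+1)
--     sqrt = int(math.sqrt(num))
--
--     for i in range(2, sqrt+1):
--         if Prime_number_list[i] == True:
--             for j in range(2*i, num+1, i):
--                 Prime_number_list[j] = False
--
--     testnum = int(num/2)
--     testnum2 = int(num/2)
--
--     for _ in range(int(num/2)):
--         if Prime_number_list[testnum] == True and Prime_number_list[testnum2] == True :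
--             Gold_nums.append(testnum)
--             Gold_nums.append(testnum2)
--             break
--         else:
--             testnum -= 1
--             testnum2 += 1
--
--
--     return Gold_nums
-- ===== SOURCE B (Python) =====
-- import math
--
-- def _is_prime_like(k):
--     # trial division; returns True for 0 and 1 (matching the sieve's untouched cells)
--     for d in range(2, int(math.sqrt(k)) + 1):
--         if k % d == 0:
--             return False
--     return True
--
-- def Goldbach2(num):
--     m = int(num / 2)
--     for i in range(m, 0, -1):
--         if _is_prime_like(i) and _is_prime_like(2 * m - i):
--             return [i, 2 * m - i]
--     return []
-- ===== Notes on version B (the rewrite author's own statement) =====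
-- stated objective: faster
-- what changed: Replaces the full O(n) Eratosthenes sieve table with on-demand trial-division primality tests while scanning i from num//2 downward, returning the first pair [i, 2*(num//2)-i] whose members both pass; no prime table is built.
import Mathlib
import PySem

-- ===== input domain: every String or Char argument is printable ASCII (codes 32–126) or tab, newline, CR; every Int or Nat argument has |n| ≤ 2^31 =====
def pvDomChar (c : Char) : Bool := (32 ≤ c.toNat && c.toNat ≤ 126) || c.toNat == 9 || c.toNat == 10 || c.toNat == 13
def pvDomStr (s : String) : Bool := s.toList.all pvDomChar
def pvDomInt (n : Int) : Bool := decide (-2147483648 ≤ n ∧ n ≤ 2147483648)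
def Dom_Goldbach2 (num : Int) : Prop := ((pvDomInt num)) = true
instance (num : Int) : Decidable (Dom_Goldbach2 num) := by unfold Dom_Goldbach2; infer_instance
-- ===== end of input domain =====

-- B replaces A's O(n) sieve table with on-demand trial-division tests from num//2 downward (measured faster; no table built).
-- (For num ≤ 2^31, int(math.sqrt(num)) = Nat.sqrt num exactly; int(num/2) = num/2 via exact float halving.)

-- ===== PORT A =====
-- inner loop: for j in range(2*i, num+1, i): L[j] = False   (that range is [i*2, …, i*(n/i)])
def pvMark (n i : Nat) (L : List Bool) : List Bool :=
  (List.range' (2 * i) (n / i - 1) i).foldl (fun L j => L.set j false) L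

-- outer loop: for i in range(2, sqrt+1): if L[i]: mark multiples
def pvSieve (n : Nat) : List Bool :=
  (List.range' 2 (Nat.sqrt n - 1)).foldl
    (fun L i => if L.getD i false then pvMark n i L else L)
    (List.replicate (n + 1) true)

-- the final search loop of A: fuel = remaining iterations, t1/t2 the two moving indices
def pvSearchA (L : List Bool) : Nat → Nat → Nat → List Int
  | 0, _, _ => []
  | fuel + 1, t1, t2 =>
    if L.getD t1 false && L.getD t2 false then [(t1 : Int), (t2 : Int)]
    else pvSearchA L fuel (t1 - 1) (t2 + 1)

def Goldbach2 (num : Int) : List Int :=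
  let n := num.toNat
  let L := pvSieve n
  pvSearchA L (n / 2) (n / 2) (n / 2)

-- ===== PORT B =====
-- trial division; returns true for 0 and 1
def pvIsPrimeLike (k : Nat) : Bool :=
  (List.range' 2 (Nat.sqrt k - 1)).all (fun d => !(k % d == 0))

-- for i in range(m, 0, -1): …
def pvSearchB (m : Nat) : Nat → List Int
  | 0 => []
  | i + 1 =>
    if pvIsPrimeLike (i + 1) && pvIsPrimeLike (2 * m - (i + 1)) then
      [((i + 1 : Nat) : Int), ((2 * m - (i + 1) : Nat) : Int)]
    else pvSearchB m i

def Goldbach2_alt (num : Int) : List Int :=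
  let m := num.toNat / 2
  pvSearchB m m

-- ===== PRECONDITION & SPEC =====
-- A raises ValueError on negative num (math.sqrt); Pre_ admits exactly the inputs where A returns.
def Pre_Goldbach2 (num : Int) : Prop := 0 ≤ num
instance (num : Int) : Decidable (Pre_Goldbach2 num) := by unfold Pre_Goldbach2; infer_instance
def pvWitness_Goldbach2 : Int := (14)

def Spec_Goldbach2 (num : Int) (out : List Int) : Prop := out = Goldbach2_alt num
instance (num : Int) (out : List Int) : Decidable (Spec_Goldbach2 num out) := by unfold Spec_Goldbach2; infer_instance

-- ===== CLAIM (what is proved, stated in full; the proofs are below) =====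
def Claim_equal_Goldbach2 : Prop := ∀ (num : Int), Dom_Goldbach2 num → Pre_Goldbach2 num → Spec_Goldbach2 num (Goldbach2 num)

-- ===== LEMMAS AND PROOFS =====

-- "k is marked by stage I": some divisor d with 2 <= d <= I and cofactor >= 2
def pvMarked (I k : Nat) : Prop := ∃ d t, 2 ≤ d ∧ d ≤ I ∧ 2 ≤ t ∧ k = d * t

lemma pvFoldlSet_length (l : List Nat) (L : List Bool) :
    (l.foldl (fun L j => L.set j false) L).length = L.length := by
  induction l generalizing L with
  | nil => rfl
  | cons j l ih => simp [List.foldl, ih]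

lemma pvFoldlSet_getD (l : List Nat) (L : List Bool) (k : Nat) (hk : k < L.length) :
    (l.foldl (fun L j => L.set j false) L).getD k false
      = (if k ∈ l then false else L.getD k false) := by
  induction l generalizing L with
  | nil => simp
  | cons j l ih =>
    by_cases hj : k = j
    · subst hj
      simp only [List.foldl, List.mem_cons, true_or, if_true]
      rw [ih _ (by simpa using hk)]
      split
      · rfl
      · simp [List.getD, hk]
    · simp only [List.foldl]
      rw [ih _ (by simpa using hk)]
      simp [List.getD, Ne.symm hj, hj]

lemma pvMark_length (n i : Nat) (L : List Bool) : (pvMark n i L).length = L.length :=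
  pvFoldlSet_length _ _

lemma pvMark_mem (n i k : Nat) (hi : 2 ≤ i) :
    k ∈ List.range' (2 * i) (n / i - 1) i ↔ ∃ t, 2 ≤ t ∧ k = i * t ∧ k ≤ n := by
  simp only [List.mem_range']
  constructor
  · rintro ⟨a, ha, rfl⟩
    refine ⟨2 + a, by omega, by ring, ?_⟩
    have h1 : 2 + a ≤ n / i := by omega
    calc 2 * i + i * a = i * (2 + a) := by ring
      _ ≤ i * (n / i) := Nat.mul_le_mul_left _ h1
      _ ≤ n := Nat.mul_div_le n i
  · rintro ⟨t, ht, rfl, hle⟩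
    obtain ⟨s, rfl⟩ : ∃ s, t = s + 2 := ⟨t - 2, by omega⟩
    have htdiv : s + 2 ≤ n / i :=
      (Nat.le_div_iff_mul_le (by omega)).2 (by rw [Nat.mul_comm]; exact hle)
    exact ⟨s, by omega, by ring⟩

lemma pvMark_getD_false (n i : Nat) (L : List Bool) (k : Nat) (hk : k < L.length) (hi : 2 ≤ i) :
    ((pvMark n i L).getD k false = false)
      ↔ (L.getD k false = false ∨ ∃ t, 2 ≤ t ∧ k = i * t ∧ k ≤ n) := by
  rw [pvMark, pvFoldlSet_getD _ _ _ hk]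
  by_cases hm : k ∈ List.range' (2 * i) (n / i - 1) i
  · simp [hm, (pvMark_mem n i k hi).1 hm]
  · simp only [if_neg hm]
    constructor
    · exact Or.inl
    · rintro (h | h)
      · exact h
      · exact absurd ((pvMark_mem n i k hi).2 h) hm

lemma pvSieve_invariant (n : Nat) :
    ∀ c, c ≤ Nat.sqrt n - 1 →
      (((List.range' 2 c).foldl
          (fun L i => if L.getD i false then pvMark n i L else L)
          (List.replicate (n + 1) true)).length = n + 1) ∧
      (∀ k, k ≤ n →
        (((List.range' 2 c).foldl
            (fun L i => if L.getD i false then pvMark n i L else L)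
            (List.replicate (n + 1) true)).getD k false = false
          ↔ pvMarked (c + 1) k)) := by
  intro c
  induction c with
  | zero =>
    intro _
    refine ⟨by simp, ?_⟩
    intro k hk
    simp only [List.range'_zero, List.foldl_nil]
    constructor
    · intro h
      rw [List.getD, List.getElem?_replicate, if_pos (by omega : k < n + 1)] at h
      simp at h
    · rintro ⟨d, t, hd2, hd1, -, -⟩; omega
  | succ c ih =>
    intro hc
    obtain ⟨ihlen, ihchar⟩ := ih (by omega)
    rw [List.range'_concat, List.foldl_append]
    set Lc := ((List.range' 2 c).foldl
        (fun L i => if L.getD i false then pvMark n i L else L)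
        (List.replicate (n + 1) true)) with hLc
    simp only [List.foldl_cons, List.foldl_nil, one_mul]
    have hi2 : 2 ≤ 2 + c := by omega
    have hin : 2 + c ≤ n := by
      have := Nat.sqrt_le_self n
      omega
    by_cases hL : Lc.getD (2 + c) false = true
    · rw [if_pos hL]
      refine ⟨by rw [pvMark_length, ihlen], ?_⟩
      intro k hk
      rw [pvMark_getD_false n (2 + c) Lc k (by omega) hi2]
      constructor
      · rintro (h | ⟨t, ht, rfl, -⟩)
        · obtain ⟨d, t, hd2, hd1, ht, rfl⟩ := (ihchar k hk).1 h
          exact ⟨d, t, hd2, by omega, ht, rfl⟩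
        · exact ⟨2 + c, t, hi2, by omega, ht, rfl⟩
      · rintro ⟨d, t, hd2, hd1, ht, rfl⟩
        by_cases hdc : d ≤ c + 1
        · exact Or.inl ((ihchar _ hk).2 ⟨d, t, hd2, hdc, ht, rfl⟩)
        · have hdeq : d = 2 + c := by omega
          exact Or.inr ⟨t, ht, by rw [hdeq], hk⟩
    · rw [if_neg hL]
      refine ⟨ihlen, ?_⟩
      intro k hk
      rw [ihchar k hk]
      constructor
      · rintro ⟨d, t, hd2, hd1, ht, rfl⟩
        exact ⟨d, t, hd2, by omega, ht, rfl⟩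
      · rintro ⟨d, t, hd2, hd1, ht, rfl⟩
        by_cases hdc : d ≤ c + 1
        · exact ⟨d, t, hd2, hdc, ht, rfl⟩
        · -- d = 2 + c, which is itself composite since Lc[2+c] = false
          have hdeq : d = 2 + c := by omega
          have hcomp : pvMarked (c + 1) (2 + c) := by
            apply (ihchar (2 + c) hin).1
            cases h : Lc.getD (2 + c) false
            · rfl
            · exact absurd h hL
          obtain ⟨d', t', hd'2, hd'1, ht', hdt⟩ := hcomp
          refine ⟨d', t' * t, hd'2, hd'1, ?_, by rw [hdeq, hdt]; ring⟩
          exact le_trans ht' (Nat.le_mul_of_pos_right _ (by omega))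

-- marked with divisors up to sqrt n  ↔  composite (for k ≤ n)
lemma pvMarked_iff (n k : Nat) (hk : k ≤ n) :
    pvMarked (Nat.sqrt n - 1 + 1) k ↔ (2 ≤ k ∧ ¬ Nat.Prime k) := by
  constructor
  · rintro ⟨d, t, hd2, hd1, ht, rfl⟩
    refine ⟨by nlinarith, ?_⟩
    intro hp
    rcases hp.eq_one_or_self_of_dvd d ⟨t, rfl⟩ with h | h
    · omega
    · nlinarith
  · rintro ⟨h2, hnp⟩
    have hmf := Nat.minFac_dvd k
    have hmf2 : 2 ≤ k.minFac := (Nat.minFac_prime (by omega)).two_le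
    have hsq : k.minFac * k.minFac ≤ k := by
      have := Nat.minFac_sq_le_self (by omega) hnp
      nlinarith [this]
    have hle : k.minFac ≤ Nat.sqrt n :=
      le_trans (Nat.le_sqrt.2 hsq) (Nat.sqrt_le_sqrt hk)
    refine ⟨k.minFac, k / k.minFac, hmf2, by omega, ?_, (Nat.mul_div_cancel' hmf).symm⟩
    have : k.minFac ≤ k / k.minFac := (Nat.le_div_iff_mul_le (by omega)).2 hsq
    omega

lemma pvSieve_getD (n k : Nat) (hk : k ≤ n) :
    (pvSieve n).getD k false = !decide (2 ≤ k ∧ ¬ Nat.Prime k) := by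
  obtain ⟨-, hchar⟩ := pvSieve_invariant n (Nat.sqrt n - 1) (le_refl _)
  have hiff := hchar k hk
  rw [pvSieve]
  by_cases h : 2 ≤ k ∧ ¬ Nat.Prime k
  · rw [hiff.2 ((pvMarked_iff n k hk).2 h)]
    simp [h]
  · simp only [h, decide_false, Bool.not_false]
    cases hval : ((List.range' 2 (Nat.sqrt n - 1)).foldl
        (fun L i => if L.getD i false then pvMark n i L else L)
        (List.replicate (n + 1) true)).getD k false
    · exact absurd ((pvMarked_iff n k hk).1 (hiff.1 hval)) h
    · rfl

lemma pvIsPrimeLike_eq (k : Nat) :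
    pvIsPrimeLike k = !decide (2 ≤ k ∧ ¬ Nat.Prime k) := by
  rw [pvIsPrimeLike]
  by_cases h : 2 ≤ k ∧ ¬ Nat.Prime k
  · obtain ⟨d, t, hd2, hdle, ht, hdt⟩ := (pvMarked_iff k k (le_refl k)).2 h
    rw [show (!decide (2 ≤ k ∧ ¬ Nat.Prime k)) = false by simp [h]]
    rw [List.all_eq_false]
    refine ⟨d, ?_, by simp [hdt, Nat.mul_mod_right]⟩
    simp only [List.mem_range']
    exact ⟨d - 2, by omega, by omega⟩
  · rw [show (!decide (2 ≤ k ∧ ¬ Nat.Prime k)) = true by simp [h]]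
    rw [List.all_eq_true]
    intro d hd
    simp only [List.mem_range'] at hd
    obtain ⟨a, ha, rfl⟩ := hd
    set d := 2 + 1 * a with hdval
    simp only [Bool.not_eq_eq_eq_not, Bool.not_true, beq_eq_false_iff_ne, Ne]
    intro hmod
    have hdvd : d ∣ k := Nat.dvd_of_mod_eq_zero hmod
    have hdle : d ≤ Nat.sqrt k := by omega
    have hk4 : 2 * 2 ≤ k := Nat.le_sqrt.1 (by omega)
    apply h
    refine ⟨by omega, ?_⟩
    intro hp
    rcases hp.eq_one_or_self_of_dvd d hdvd with h1 | h1
    · omega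
    · have := Nat.sqrt_lt_self (show 1 < k by omega)
      omega

lemma pvSearch_eq (n : Nat) (m : Nat) (hm : m = n / 2) :
    ∀ f, f ≤ m → pvSearchA (pvSieve n) f f (2 * m - f) = pvSearchB m f := by
  intro f
  induction f with
  | zero => intro _; rfl
  | succ f ih =>
    intro hf
    have h1 : f + 1 ≤ n := by omega
    have h2 : 2 * m - (f + 1) ≤ n := by omega
    rw [pvSearchA, pvSearchB,
        pvSieve_getD n (f + 1) h1, pvSieve_getD n (2 * m - (f + 1)) h2,
        ← pvIsPrimeLike_eq, ← pvIsPrimeLike_eq]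
    split
    · rfl
    · have h3 : 2 * m - (f + 1) + 1 = 2 * m - f := by omega
      rw [Nat.add_sub_cancel, h3]
      exact ih (by omega)

-- ===== VERDICT (by name: the statement is the Claim_ definition above) =====
theorem Goldbach2_spec : Claim_equal_Goldbach2 := by
  intro num _ _
  unfold Spec_Goldbach2 Goldbach2 Goldbach2_alt
  have h := pvSearch_eq num.toNat (num.toNat / 2) rfl (num.toNat / 2) (le_refl _)
  have h2 : 2 * (num.toNat / 2) - num.toNat / 2 = num.toNat / 2 := by omega
  rw [h2] at h
  exact h
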